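-- pv_equiv track=rewrite | github.com/ApurvK032/WarehouseBot-Pick-and-Drop-Optimization | warehousebot/visualize.py | route_has_interleaved_drops
-- ===== SOURCE A (Python) =====
-- from typing import List, Tuple, Dict, Optional
--
-- def route_has_interleaved_drops(route: List[int], names: List[str]) -> bool:
--     """
--     Check if route has interleaved drops (drop before last pickup).
--
--     Args:
--         route: List of stop indices in visit order
--         names: List of stop names
--
--     Returns:
--         True if there exists a drop that occurs before the last pickup
--     """
--     # Find positions of pickups and drops
--     pickup_positions = []
--     drop_positions = []
--
--     for pos, stop_idx in enumerate(route):
--         name = names[stop_idx]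
--         if name.startswith('P') and name != 'START':
--             pickup_positions.append(pos)
--         elif name.startswith('D'):
--             drop_positions.append(pos)
--
--     # No pickups or drops means no interleaving
--     if not pickup_positions or not drop_positions:
--         return False
--
--     # Find last pickup position and first drop position
--     last_pickup_pos = max(pickup_positions)
--     first_drop_pos = min(drop_positions)
--
--     # Interleaving occurs if first drop comes before last pickup
--     return first_drop_pos < last_pickup_pos
-- ===== SOURCE B (Python) =====
-- from typing import List
--
-- def route_has_interleaved_drops(route: List[int], names: List[str]) -> bool:
--     """Single streaming pass: flag once a drop is seen; a later pickup proves interleaving."""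
--     seen_drop = False
--     for stop_idx in route:
--         name = names[stop_idx]
--         if name.startswith('P') and name != 'START':
--             if seen_drop:
--                 return True
--         elif name.startswith('D'):
--             seen_drop = True
--     return False
-- ===== Notes on version B (the rewrite author's own statement) =====
-- stated objective: simpler
-- what changed: Replaces building two position lists plus max/min reductions by a single streaming pass with one boolean flag and early exit: any pickup encountered after a drop immediately returns True.
import Mathlib
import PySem

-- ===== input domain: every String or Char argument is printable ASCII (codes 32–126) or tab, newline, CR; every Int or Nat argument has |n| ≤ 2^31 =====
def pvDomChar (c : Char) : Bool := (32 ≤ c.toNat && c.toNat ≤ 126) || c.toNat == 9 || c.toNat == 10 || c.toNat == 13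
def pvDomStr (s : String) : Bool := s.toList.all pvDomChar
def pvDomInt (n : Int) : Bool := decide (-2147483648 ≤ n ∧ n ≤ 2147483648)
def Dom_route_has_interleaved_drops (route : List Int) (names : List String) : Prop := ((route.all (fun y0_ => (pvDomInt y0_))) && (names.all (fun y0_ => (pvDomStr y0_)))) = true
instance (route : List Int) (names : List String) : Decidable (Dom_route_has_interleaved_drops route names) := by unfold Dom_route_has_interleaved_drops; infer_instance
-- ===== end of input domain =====

-- B replaces A's two position lists + max/min reductions by one streaming pass with a
-- boolean flag and early exit (objective: simpler); return values agree on all of Pre_.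

-- ===== PORT A =====
-- literal port of A: enumerate the route, append pickup/drop positions to two lists,
-- then test emptiness and compare min(drops) with max(pickups)
def route_has_interleaved_drops (route : List Int) (names : List String) : Bool :=
  let st := (PySem.List.enumerate route 0).foldl
    (fun (acc : List Int × List Int) pi =>
      let name := (PySem.List.pyGet? names pi.2).getD ""
      if PySem.Str.startswith name "P" && name != "START" then (acc.1 ++ [pi.1], acc.2)
      else if PySem.Str.startswith name "D" then (acc.1, acc.2 ++ [pi.1])
      else acc) ([], [])
  if st.1.isEmpty || st.2.isEmpty then false
  else
    let last_pickup_pos := (PySem.List.max? st.1 (fun y => y)).getD 0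
    let first_drop_pos := (PySem.List.min? st.2 (fun y => y)).getD 0
    decide (first_drop_pos < last_pickup_pos)

-- ===== PORT B =====
-- literal port of B: one pass carrying the seen_drop flag; early return becomes `true`
def pvAltLoop (names : List String) (l : List Int) (seen_drop : Bool) : Bool :=
  match l with
  | [] => false
  | stop_idx :: rest =>
    let name := (PySem.List.pyGet? names stop_idx).getD ""
    if PySem.Str.startswith name "P" && name != "START" then
      (if seen_drop then true else pvAltLoop names rest seen_drop)
    else if PySem.Str.startswith name "D" then pvAltLoop names rest true
    else pvAltLoop names rest seen_drop

def route_has_interleaved_drops_alt (route : List Int) (names : List String) : Bool :=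
  pvAltLoop names route false

-- ===== PRECONDITION & SPEC =====
-- Pre_ excludes exactly the inputs where Python raises IndexError on names[stop_idx]
-- (both A and B index the same way and raise on the same inputs).
def Pre_route_has_interleaved_drops (route : List Int) (names : List String) : Prop :=
  ∀ i ∈ route, -(names.length : Int) ≤ i ∧ i < (names.length : Int)
instance (route : List Int) (names : List String) : Decidable (Pre_route_has_interleaved_drops route names) := by unfold Pre_route_has_interleaved_drops; infer_instance

def pvWitness_route_has_interleaved_drops : List Int × List String := ([0, 1, 2], ["P1", "D1", "P2"])

def Spec_route_has_interleaved_drops (route : List Int) (names : List String) (out : Bool) : Prop := out = route_has_interleaved_drops_alt route names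
instance (route : List Int) (names : List String) (out : Bool) : Decidable (Spec_route_has_interleaved_drops route names out) := by unfold Spec_route_has_interleaved_drops; infer_instance

-- ===== CLAIM (what is proved, stated in full; the proofs are below) =====
def Claim_equal_route_has_interleaved_drops : Prop := ∀ (route : List Int) (names : List String), Dom_route_has_interleaved_drops route names → Pre_route_has_interleaved_drops route names → Spec_route_has_interleaved_drops route names (route_has_interleaved_drops route names)

-- ===== LEMMAS AND PROOFS =====

-- classification of a route entry, shared shape of both ports
def pvIsP (names : List String) (i : Int) : Bool :=
  let name := (PySem.List.pyGet? names i).getD ""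
  PySem.Str.startswith name "P" && name != "START"
def pvIsD (names : List String) (i : Int) : Bool :=
  let name := (PySem.List.pyGet? names i).getD ""
  PySem.Str.startswith name "D"

-- positions (starting at k) of pickups / drops, as A's loop produces them
def pvPpos (names : List String) (k : Int) : List Int → List Int
  | [] => []
  | i :: r => if pvIsP names i then k :: pvPpos names (k + 1) r else pvPpos names (k + 1) r
def pvDpos (names : List String) (k : Int) : List Int → List Int
  | [] => []
  | i :: r =>
    if pvIsP names i then pvDpos names (k + 1) r
    else if pvIsD names i then k :: pvDpos names (k + 1) r
    else pvDpos names (k + 1) r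

-- A's post-loop computation, expressed on the two position lists
def pvAres (ps ds : List Int) : Bool :=
  if ps.isEmpty || ds.isEmpty then false
  else decide ((PySem.List.min? ds (fun y => y)).getD 0 < (PySem.List.max? ps (fun y => y)).getD 0)

theorem pvFoldl_eq (names : List String) :
    ∀ (l : List Int) (k : Int) (ps ds : List Int),
    (PySem.List.enumerate l k).foldl
      (fun (acc : List Int × List Int) pi =>
        let name := (PySem.List.pyGet? names pi.2).getD ""
        if PySem.Str.startswith name "P" && name != "START" then (acc.1 ++ [pi.1], acc.2)
        else if PySem.Str.startswith name "D" then (acc.1, acc.2 ++ [pi.1])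
        else acc) (ps, ds)
      = (ps ++ pvPpos names k l, ds ++ pvDpos names k l) := by
  intro l
  induction l with
  | nil => intro k ps ds; simp [PySem.List.enumerate_nil, pvPpos, pvDpos]
  | cons i r ih =>
    intro k ps ds
    rw [PySem.List.enumerate_cons]
    by_cases hp : pvIsP names i
    · simp only [List.foldl_cons, pvPpos, pvDpos, pvIsP] at hp ⊢
      rw [if_pos hp, if_pos hp]
      simp only [hp, if_true]
      rw [ih]
      simp
    · by_cases hd : pvIsD names i
      · simp only [List.foldl_cons, pvPpos, pvDpos, pvIsP, pvIsD] at hp hd ⊢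
        rw [if_neg hp, if_neg hp, if_pos hd, if_pos hd]
        simp only [hp]
        rw [ih]
        simp
      · simp only [List.foldl_cons, pvPpos, pvDpos, pvIsP, pvIsD] at hp hd ⊢
        rw [if_neg hp, if_neg hp, if_neg hd, if_neg hd]
        simp only [hp]
        rw [ih]
        simp

theorem pvPpos_bound (names : List String) :
    ∀ (l : List Int) (k x : Int), x ∈ pvPpos names k l → k ≤ x := by
  intro l
  induction l with
  | nil => intro k x h; simp [pvPpos] at h
  | cons i r ih =>
    intro k x h
    simp only [pvPpos] at h
    split at h
    · rcases List.mem_cons.mp h with h | h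
      · omega
      · have := ih (k + 1) x h; omega
    · have := ih (k + 1) x h; omega

theorem pvDpos_bound (names : List String) :
    ∀ (l : List Int) (k x : Int), x ∈ pvDpos names k l → k ≤ x := by
  intro l
  induction l with
  | nil => intro k x h; simp [pvDpos] at h
  | cons i r ih =>
    intro k x h
    simp only [pvDpos] at h
    split at h
    · have := ih (k + 1) x h; omega
    · split at h
      · rcases List.mem_cons.mp h with h | h
        · omega
        · have := ih (k + 1) x h; omega
      · have := ih (k + 1) x h; omega

-- B's loop with the flag already set just searches for any pickup
theorem pvAltLoop_true (names : List String) :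
    ∀ (l : List Int) (k : Int), pvAltLoop names l true = !(pvPpos names k l).isEmpty := by
  intro l
  induction l with
  | nil => intro k; rfl
  | cons i r ih =>
    intro k
    simp only [pvAltLoop, pvPpos, pvIsP]
    split
    · simp
    · split
      · rw [ih (k + 1)]
      · rw [ih (k + 1)]

theorem pvFoldl_min_eq (ds : List Int) : ∀ (k : Int), (∀ x ∈ ds, k ≤ x) → ds.foldl min k = k := by
  induction ds with
  | nil => intro k _; rfl
  | cons d t ih =>
    intro k h
    have hd : k ≤ d := h d (by simp)
    simp only [List.foldl_cons]
    rw [min_eq_left hd]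
    exact ih k (fun x hx => h x (by simp [hx]))

theorem pvMax_cons_drop (k : Int) (ps : List Int) (hne : ps ≠ [])
    (hb : ∀ x ∈ ps, k < x) :
    PySem.List.max? (k :: ps) (fun y => y) = PySem.List.max? ps (fun y => y) := by
  obtain ⟨h, t, rfl⟩ := List.exists_cons_of_ne_nil hne
  rw [PySem.List.max?_id_cons, PySem.List.max?_id_cons]
  have hk : max k h = h := max_eq_right (le_of_lt (hb h (by simp)))
  simp only [List.foldl_cons, hk]

theorem pvMin_cons_keep (k : Int) (ds : List Int) (hb : ∀ x ∈ ds, k ≤ x) :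
    PySem.List.min? (k :: ds) (fun y => y) = some k := by
  rw [PySem.List.min?_id_cons, pvFoldl_min_eq ds k hb]

-- main lemma: A's reduction over the position lists equals B's streaming pass
theorem pvMain (names : List String) :
    ∀ (l : List Int) (k : Int),
      pvAres (pvPpos names k l) (pvDpos names k l) = pvAltLoop names l false := by
  intro l
  induction l with
  | nil => intro k; rfl
  | cons i r ih =>
    intro k
    by_cases hp : pvIsP names i
    · -- pickup at position k
      simp only [pvPpos, pvDpos, pvIsP] at hp ⊢
      rw [if_pos hp, if_pos hp]
      simp only [pvAltLoop, hp, if_true, Bool.false_eq_true, if_false]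
      rw [← ih (k + 1)]
      set P' := pvPpos names (k + 1) r with hP
      set D' := pvDpos names (k + 1) r with hD
      by_cases hDe : D'.isEmpty
      · simp [pvAres, hDe]
      · by_cases hPe : P'.isEmpty
        · -- P' empty: min D' ≥ k+1 > k = max [k], so both sides are false
          have hPnil : P' = [] := List.isEmpty_iff.mp hPe
          have hDnil : D' ≠ [] := fun h => hDe (by simp [h])
          obtain ⟨d, t, hDeq⟩ := List.exists_cons_of_ne_nil hDnil
          have hm : PySem.List.min? D' (fun y => y) = some (t.foldl min d) := by
            rw [hDeq, PySem.List.min?_id_cons]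
          have hmem : t.foldl min d ∈ D' := by
            rw [hDeq]; rcases PySem.List.foldl_min_mem t d with h | h
            · simp [h]
            · simp [h]
          have hkm : k + 1 ≤ t.foldl min d := pvDpos_bound names r (k + 1) _ hmem
          simp only [pvAres, hPnil, List.isEmpty_nil, List.isEmpty_cons, Bool.false_or,
            Bool.true_or, if_true, hDe, Bool.false_eq_true, if_false,
            PySem.List.max?_id_cons, List.foldl_nil, hm, Option.getD_some]
          simp only [decide_eq_false_iff_not, not_lt]
          omega
        · -- both position lists nonempty: the extra front position k never wins the max
          have hPnil : P' ≠ [] := fun h => hPe (by simp [h])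
          have hb : ∀ x ∈ P', k < x := fun x hx => by
            have := pvPpos_bound names r (k + 1) x hx; omega
          simp only [pvAres, List.isEmpty_cons, Bool.false_or, hDe, hPe,
            pvMax_cons_drop k P' hPnil hb]
    · by_cases hd : pvIsD names i
      · -- drop at position k: it becomes the minimum; result = "any pickup after"
        simp only [pvPpos, pvDpos, pvIsP, pvIsD] at hp hd ⊢
        rw [if_neg hp, if_neg hp, if_pos hd]
        simp only [pvAltLoop, hp, hd, Bool.false_eq_true, if_false, if_true]
        rw [pvAltLoop_true names r (k + 1)]
        set P' := pvPpos names (k + 1) r with hP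
        set D' := pvDpos names (k + 1) r with hD
        by_cases hPe : P'.isEmpty
        · simp [pvAres, hPe]
        · have hbD : ∀ x ∈ D', k ≤ x := fun x hx => by
            have := pvDpos_bound names r (k + 1) x hx; omega
          have hPnil : P' ≠ [] := fun h => hPe (by simp [h])
          obtain ⟨p, t, hPeq⟩ := List.exists_cons_of_ne_nil hPnil
          have hm : PySem.List.max? P' (fun y => y) = some (t.foldl max p) := by
            rw [hPeq, PySem.List.max?_id_cons]
          have hmem : t.foldl max p ∈ P' := by
            rw [hPeq]; rcases PySem.List.foldl_max_mem t p with h | h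
            · simp [h]
            · simp [h]
          have hkm : k + 1 ≤ t.foldl max p := pvPpos_bound names r (k + 1) _ hmem
          simp only [pvAres, List.isEmpty_cons, Bool.or_false, hPe, Bool.false_eq_true,
            if_false, pvMin_cons_keep k D' hbD, hm, Option.getD_some]
          simp only [Bool.not_false, decide_eq_true_iff]
          omega
      · -- neither a pickup nor a drop: both sides just recurse
        simp only [pvPpos, pvDpos, pvIsP, pvIsD] at hp hd ⊢
        rw [if_neg hp, if_neg hp, if_neg hd]
        simp only [pvAltLoop, hp, hd, Bool.false_eq_true, if_false]
        exact ih (k + 1)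

-- ===== VERDICT (by name: the statement is the Claim_ definition above) =====
theorem route_has_interleaved_drops_spec : Claim_equal_route_has_interleaved_drops := by
  intro route names _ _
  unfold Spec_route_has_interleaved_drops route_has_interleaved_drops route_has_interleaved_drops_alt
  rw [pvFoldl_eq names route 0 [] []]
  simpa [pvAres] using pvMain names route 0
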